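-- pv_equiv track=rewrite | github.com/shinychan95/algorithm-study | CSED331/ASSN2/MinCartesianProduct3.py | sort_one_by_one2
-- ===== SOURCE A (Python) =====
-- def binary_search_insert(arr, v):
--     start = 0
--     end = len(arr) - 1
--     while 1:
--         if end == -1:
--             arr.append(v)
--             break
--         if end == start:
--             if arr[end][0] < v[0] or (arr[end][0] == v[0] and arr[end][1] < v[1]):
--                 arr.append(v)
--             else:
--                 arr.insert(end, v)
--             break
--         middle = start + (end - start) // 2
--         if arr[middle][0] < v[0]:
--             start = middle + 1
--         elif arr[middle][0] == v[0]:
--             if arr[middle][1] < v[1]: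
--                 start = middle + 1
--             else:
--                 end = middle
--         else:
--             end = middle
--     return arr
--
-- def sort_one_by_one2(a, b, n):
--     arr = [[v*b[0], i, 0] for i, v in enumerate(a)]
--     n -= 1
--     for i in range(n):
--         if arr[0][2] == len(b) - 1:
--             del arr[0]
--             n -= 1
--             continue
--         tmp = [a[arr[0][1]]*b[arr[0][2] + 1], arr[0][1], arr[0][2] + 1]
--         del arr[0]
--         arr = binary_search_insert(arr, tmp)
--
--     return arr[0][0]
-- ===== SOURCE B (Python) =====
-- def sort_one_by_one2(a, b, n):
--     # Functional reformulation: the binary-probe insertion position is computed by a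
--     # recursive divide-and-conquer over list halves (None = "append at the end"),
--     # and each step rebuilds the worklist by slicing instead of in-place mutation.
--     def pos(c, v):
--         if not c:
--             return None
--         if len(c) == 1:
--             return None if c[0][0] < v[0] else 0
--         m = (len(c) - 1) // 2
--         if c[m][0] < v[0]:
--             r = pos(c[m + 1:], v)
--             return None if r is None else m + 1 + r
--         return pos(c[:m + 1], v)
--
--     last = len(b) - 1
--     arr = [((x * b[0], i), 0) for i, x in enumerate(a)]
--     for _ in range(n - 1):
--         ((_, i), j) = arr[0]
--         rest = arr[1:]
--         if j == last:
--             arr = rest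
--         else:
--             v = ((a[i] * b[j + 1], i), j + 1)
--             p = pos(rest, v)
--             arr = rest + [v] if p is None else rest[:p] + [v] + rest[p:]
--     return arr[0][0][0]
-- ===== Notes on version B (the rewrite author's own statement) =====
-- stated objective: alternative
-- what changed: A's imperative start/end binary-probe while-loop that mutates the worklist (del/insert/append) is replaced by a recursive divide-and-conquer position function over list halves (None = append) and a loop that rebuilds the worklist by slicing.
import Mathlib
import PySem

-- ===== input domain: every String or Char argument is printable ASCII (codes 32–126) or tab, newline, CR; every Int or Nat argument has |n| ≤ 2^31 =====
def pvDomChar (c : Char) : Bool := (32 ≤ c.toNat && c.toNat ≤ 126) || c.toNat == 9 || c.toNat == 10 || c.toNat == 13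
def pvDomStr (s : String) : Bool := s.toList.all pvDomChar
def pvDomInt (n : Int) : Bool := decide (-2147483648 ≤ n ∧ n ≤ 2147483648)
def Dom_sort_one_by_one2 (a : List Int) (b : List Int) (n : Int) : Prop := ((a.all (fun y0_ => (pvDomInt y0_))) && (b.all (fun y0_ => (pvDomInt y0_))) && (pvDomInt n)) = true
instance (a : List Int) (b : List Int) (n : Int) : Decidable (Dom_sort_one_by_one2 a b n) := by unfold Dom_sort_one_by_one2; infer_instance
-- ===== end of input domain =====

-- B replaces A's imperative start/end binary-probe insertion loop with a recursive
-- divide-and-conquer position function over list halves and rebuilds the worklist by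
-- slicing instead of mutating it (objective: alternative structure, same cost).

-- ===== PORT A =====
-- A's entries are 3-element lists [product, row, col]; ported as triples (Int × Int × Int).
-- 'arr[end][0] < v[0] or (arr[end][0] == v[0] and arr[end][1] < v[1])'
def pvLtA (x v : Int × Int × Int) : Bool :=
  decide (x.1 < v.1) || (decide (x.1 = v.1) && decide (x.2.1 < v.2.1))

-- the 'while 1' loop of binary_search_insert, state (start, end); fuel = arr.length + 1
-- suffices for every call the program makes (the interval [start, end] shrinks each pass)
def pvBsiGo (fuel : Nat) (arr : List (Int × Int × Int)) (v : Int × Int × Int)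
    (s e : Int) : List (Int × Int × Int) :=
  match fuel with
  | 0 => arr
  | fuel + 1 =>
    if e = -1 then arr ++ [v]
    else if e = s then
      if pvLtA (PySem.List.pyGetD arr e default) v then arr ++ [v]
      else PySem.List.insert arr e v
    else
      let m := s + PySem.Int.floordiv (e - s) 2
      let am := PySem.List.pyGetD arr m default
      if am.1 < v.1 then pvBsiGo fuel arr v (m + 1) e
      else if am.1 = v.1 then
        if am.2.1 < v.2.1 then pvBsiGo fuel arr v (m + 1) e
        else pvBsiGo fuel arr v s m
      else pvBsiGo fuel arr v s m

def pvBinarySearchInsert (arr : List (Int × Int × Int)) (v : Int × Int × Int) :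
    List (Int × Int × Int) :=
  pvBsiGo (arr.length + 1) arr v 0 ((arr.length : Int) - 1)

-- body of the 'for i in range(n)' loop; state (arr, n): the body's dead 'n -= 1' is
-- carried in the state (it cannot change the already-created range)
def pvStepA (a b : List Int) (st : List (Int × Int × Int) × Int) (_i : Nat) :
    List (Int × Int × Int) × Int :=
  let arr := st.1
  let h := PySem.List.pyGetD arr 0 default
  if h.2.2 = (b.length : Int) - 1 then
    (arr.drop 1, st.2 - 1)
  else
    let tmp := (PySem.List.pyGetD a h.2.1 0 * PySem.List.pyGetD b (h.2.2 + 1) 0,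
                h.2.1, h.2.2 + 1)
    (pvBinarySearchInsert (arr.drop 1) tmp, st.2)

def sort_one_by_one2 (a : List Int) (b : List Int) (n : Int) : Int :=
  let arr0 := (PySem.List.enumerate a).map
    (fun p => (p.2 * PySem.List.pyGetD b 0 0, p.1, (0 : Int)))
  let n1 := n - 1
  let st := (List.range n1.toNat).foldl (pvStepA a b) (arr0, n1)
  (PySem.List.pyGetD st.1 0 default).1

-- ===== PORT B =====
-- B's entries are nested pairs ((product, row), col); Python's '<' on int 2-tuples:
def pvLtB (x v : Int × Int) : Bool :=
  decide (x.1 < v.1) || (decide (x.1 = v.1) && decide (x.2 < v.2))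

-- recursive divide-and-conquer insertion position; none = "append at the end".
-- fuel is only a termination device: c.length suffices (each call halves the list)
def pvPosGo (fuel : Nat) (v : (Int × Int) × Int) (c : List ((Int × Int) × Int)) : Option Nat :=
  match fuel with
  | 0 => none
  | fuel + 1 =>
    if c.length = 0 then none
    else if c.length = 1 then
      if pvLtB (c.getD 0 default).1 v.1 then none else some 0
    else
      let m := (c.length - 1) / 2
      if pvLtB (c.getD m default).1 v.1 then
        (pvPosGo fuel v (c.drop (m + 1))).map (fun r => m + 1 + r)
      else pvPosGo fuel v (c.take (m + 1))

def pvPos (v : (Int × Int) × Int) (c : List ((Int × Int) × Int)) : Option Nat :=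
  pvPosGo c.length v c

-- body of B's 'for _ in range(n - 1)' loop
def pvStepB (a b : List Int) (arr : List ((Int × Int) × Int)) (_i : Nat) :
    List ((Int × Int) × Int) :=
  let h := PySem.List.pyGetD arr 0 default
  let rest := arr.drop 1
  if h.2 = (b.length : Int) - 1 then rest
  else
    let v := ((PySem.List.pyGetD a h.1.2 0 * PySem.List.pyGetD b (h.2 + 1) 0,
               h.1.2), h.2 + 1)
    match pvPos v rest with
    | none => rest ++ [v]
    | some p => rest.take p ++ [v] ++ rest.drop p

def sort_one_by_one2_alt (a : List Int) (b : List Int) (n : Int) : Int :=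
  let arr0 := (PySem.List.enumerate a).map
    (fun p => ((p.2 * PySem.List.pyGetD b 0 0, p.1), (0 : Int)))
  let arr := (List.range (n - 1).toNat).foldl (pvStepB a b) arr0
  (PySem.List.pyGetD arr 0 default).1.1

-- ===== PRECONDITION & SPEC =====
-- Pre_: exactly where Python A returns: a and b nonempty (else IndexError on arr[0] /
-- b[0]) and n ≤ len(a)*len(b) (a larger n exhausts arr and arr[0] raises IndexError).
def Pre_sort_one_by_one2 (a : List Int) (b : List Int) (n : Int) : Prop :=
  a ≠ [] ∧ b ≠ [] ∧ n ≤ (a.length : Int) * (b.length : Int)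
instance (a : List Int) (b : List Int) (n : Int) : Decidable (Pre_sort_one_by_one2 a b n) := by
  unfold Pre_sort_one_by_one2; infer_instance

def pvWitness_sort_one_by_one2 : List Int × List Int × Int := ([1, 2], [3, 4], 3)

def Spec_sort_one_by_one2 (a : List Int) (b : List Int) (n : Int) (out : Int) : Prop := out = sort_one_by_one2_alt a b n
instance (a : List Int) (b : List Int) (n : Int) (out : Int) : Decidable (Spec_sort_one_by_one2 a b n out) := by unfold Spec_sort_one_by_one2; infer_instance

-- ===== CLAIM (what is proved, stated in full; the proofs are below) =====
def Claim_equal_sort_one_by_one2 : Prop := ∀ (a : List Int) (b : List Int) (n : Int), Dom_sort_one_by_one2 a b n → Pre_sort_one_by_one2 a b n → Spec_sort_one_by_one2 a b n (sort_one_by_one2 a b n)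

-- ===== LEMMAS AND PROOFS =====

-- the entry bijection between the two ports' representations
def pvPhi (x : Int × Int × Int) : (Int × Int) × Int := ((x.1, x.2.1), x.2.2)

theorem pvLt_phi (x v : Int × Int × Int) : pvLtB (pvPhi x).1 (pvPhi v).1 = pvLtA x v := rfl

theorem pv_head_phi (arr : List (Int × Int × Int)) :
    PySem.List.pyGetD (arr.map pvPhi) 0 default = pvPhi (PySem.List.pyGetD arr 0 default) := by
  cases arr
  · rfl
  · rw [List.map_cons, PySem.List.pyGetD_zero_cons, PySem.List.pyGetD_zero_cons]

theorem pvPosGo_mono : ∀ (fuel : Nat) (v : (Int × Int) × Int)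
    (c : List ((Int × Int) × Int)), c.length ≤ fuel → pvPosGo fuel v c = pvPos v c := by
  intro fuel
  induction fuel using Nat.strong_induction_on with
  | _ fuel ih =>
    intro v c h
    rw [pvPos]
    rcases Nat.eq_or_lt_of_le h with he | hlt
    · rw [he]
    · cases fuel with
      | zero => omega
      | succ k =>
        cases hc : c.length with
        | zero => simp only [pvPosGo]; simp [hc]
        | succ j =>
          simp only [pvPosGo]
          simp only [hc]
          by_cases h1 : j + 1 = 1
          · simp [h1]
          · simp only [if_neg h1, if_neg (show ¬(j + 1 = 0) by omega)]
            rw [ih k (by omega) v _ (by simp only [List.length_drop]; omega),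
              ih k (by omega) v _ (by simp only [List.length_take]; omega),
              ih j (by omega) v _ (by simp only [List.length_drop]; omega),
              ih j (by omega) v _ (by simp only [List.length_take]; omega)]

-- one-step unfolding of pvPos in terms of itself
theorem pvPos_eq (v : (Int × Int) × Int) (c : List ((Int × Int) × Int)) :
    pvPos v c =
      if c.length = 0 then none
      else if c.length = 1 then
        if pvLtB (c.getD 0 default).1 v.1 then none else some 0
      else
        let m := (c.length - 1) / 2
        if pvLtB (c.getD m default).1 v.1 then
          (pvPos v (c.drop (m + 1))).map (fun r => m + 1 + r)
        else pvPos v (c.take (m + 1)) := by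
  cases hc : c.length with
  | zero =>
    have : c = [] := List.eq_nil_of_length_eq_zero hc
    subst this; rfl
  | succ j =>
    rw [pvPos, hc]
    simp only [pvPosGo]
    simp only [hc]
    by_cases h1 : j + 1 = 1
    · simp [h1]
    · simp only [if_neg h1, if_neg (show ¬(j + 1 = 0) by omega)]
      rw [pvPosGo_mono j v _ (by simp only [List.length_drop]; omega),
        pvPosGo_mono j v _ (by simp only [List.length_take]; omega)]

theorem pvPos_singleton (v x : (Int × Int) × Int) :
    pvPos v [x] = if pvLtB x.1 v.1 then none else some 0 := by
  rw [pvPos_eq]; simp [List.getD]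

-- THE CRUX: A's binary-probe while-loop on the interval [σ, ε] computes exactly the
-- position B's recursive pvPos finds on the corresponding slice (none = append at end).
theorem pv_bsi_pos : ∀ (fuel : Nat) (arr : List (Int × Int × Int)) (v : Int × Int × Int)
    (σ ε : Nat), ε < arr.length → σ ≤ ε → ε - σ + 1 ≤ fuel →
    pvBsiGo fuel arr v (σ : Int) (ε : Int) =
      match pvPos (pvPhi v) (((arr.drop σ).take (ε - σ + 1)).map pvPhi) with
      | none => arr ++ [v]
      | some r => arr.take (σ + r) ++ v :: arr.drop (σ + r) := by
  intro fuel
  induction fuel with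
  | zero => intro arr v σ ε h1 h2 h3; omega
  | succ k ih =>
    intro arr v σ ε hε hσ hf
    have hslen : (((arr.drop σ).take (ε - σ + 1)).map pvPhi).length = ε - σ + 1 := by
      simp [List.length_take, List.length_drop]; omega
    rw [pvBsiGo]
    rw [if_neg (by omega : ¬ (ε : Int) = -1)]
    by_cases hse : σ = ε
    · -- start == end: a single-element interval
      subst hse
      rw [if_pos rfl]
      have h1 : (arr.drop σ).take (σ - σ + 1) = [arr[σ]] := by
        have h2 : σ - σ + 1 = 1 := by omega
        rw [h2, List.drop_eq_getElem_cons hε, List.take_succ_cons, List.take_zero]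
      rw [h1]
      simp only [List.map_cons, List.map_nil]
      rw [pvPos_singleton, pvLt_phi]
      have hget : PySem.List.pyGetD arr (σ : Int) default = arr[σ] := by
        rw [PySem.List.pyGetD_natCast arr, List.getD_eq_getElem arr default hε]
      rw [hget]
      cases hb : pvLtA arr[σ] v
      · simp only [Bool.false_eq_true, if_false]
        rw [PySem.List.insert_natCast arr σ v (le_of_lt hε)]
        simp
      · simp
    · -- start < end: one probe at the midpoint
      have hlt : σ < ε := lt_of_le_of_ne hσ hse
      rw [if_neg (by omega : ¬ (ε : Int) = (σ : Int))]
      set μ := (ε - σ) / 2 with hμ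
      have hμlt : μ < ε - σ := by omega
      have hm : (σ : Int) + PySem.Int.floordiv ((ε : Int) - (σ : Int)) 2 = ((σ + μ : Nat) : Int) := by
        rw [PySem.Int.floordiv_eq_ediv_of_pos (by norm_num)]; omega
      simp only [hm]
      have hmlen : σ + μ < arr.length := by omega
      have hget : PySem.List.pyGetD arr ((σ + μ : Nat) : Int) default = arr[σ + μ] := by
        rw [PySem.List.pyGetD_natCast arr, List.getD_eq_getElem arr default hmlen]
      rw [hget]
      -- B's side: unfold pvPos once on the ≥ 2 element slice
      rw [pvPos_eq]
      simp only [hslen]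
      rw [if_neg (by omega : ¬(ε - σ + 1 = 0)), if_neg (by omega : ¬(ε - σ + 1 = 1))]
      have hrel : (ε - σ + 1 - 1) / 2 = μ := by omega
      rw [hrel]
      have hgetB : ((((arr.drop σ).take (ε - σ + 1)).map pvPhi).getD μ default)
          = pvPhi arr[σ + μ] := by
        have hμlen : μ < (((arr.drop σ).take (ε - σ + 1)).map pvPhi).length := by omega
        rw [List.getD_eq_getElem _ default hμlen]
        simp [List.getElem_take, List.getElem_drop]
      rw [hgetB, pvLt_phi]
      -- the three-way branch of A against B's single lexicographic test
      have hR : pvLtA arr[σ + μ] v = true →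
          pvBsiGo k arr v (((σ + μ : Nat) : Int) + 1) (ε : Int) =
            match (pvPos (pvPhi v) ((((arr.drop σ).take (ε - σ + 1)).map pvPhi).drop (μ + 1))).map
                (fun r => μ + 1 + r) with
            | none => arr ++ [v]
            | some r => arr.take (σ + r) ++ v :: arr.drop (σ + r) := by
        intro _
        have hc : (((σ + μ : Nat) : Int) + 1) = ((σ + μ + 1 : Nat) : Int) := by omega
        rw [hc, ih arr v (σ + μ + 1) ε hε (by omega) (by omega)]
        have hdrop : (((arr.drop σ).take (ε - σ + 1)).map pvPhi).drop (μ + 1)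
            = ((arr.drop (σ + μ + 1)).take (ε - (σ + μ + 1) + 1)).map pvPhi := by
          rw [← List.map_drop, List.drop_take, List.drop_drop]
          congr 2
          omega
        rw [hdrop]
        rcases pvPos (pvPhi v) (((arr.drop (σ + μ + 1)).take (ε - (σ + μ + 1) + 1)).map pvPhi)
          with _ | r
        · simp
        · simp only [Option.map_some]
          have : σ + (μ + 1 + r) = σ + μ + 1 + r := by omega
          rw [this]
      have hL : pvLtA arr[σ + μ] v = false →
          pvBsiGo k arr v (σ : Int) ((σ + μ : Nat) : Int) =
            match pvPos (pvPhi v) ((((arr.drop σ).take (ε - σ + 1)).map pvPhi).take (μ + 1)) with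
            | none => arr ++ [v]
            | some r => arr.take (σ + r) ++ v :: arr.drop (σ + r) := by
        intro _
        rw [ih arr v σ (σ + μ) hmlen (by omega) (by omega)]
        have htake : (((arr.drop σ).take (ε - σ + 1)).map pvPhi).take (μ + 1)
            = ((arr.drop σ).take (σ + μ - σ + 1)).map pvPhi := by
          rw [← List.map_take, List.take_take]
          congr 2
          omega
        rw [htake]
      -- now split on A's branches, reducing each to hR or hL
      by_cases h1 : arr[σ + μ].1 < v.1
      · have hb : pvLtA arr[σ + μ] v = true := by simp [pvLtA, h1]
        rw [if_pos h1, hb, if_pos rfl]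
        exact hR hb
      · rw [if_neg h1]
        by_cases h2 : arr[σ + μ].1 = v.1
        · by_cases h3 : arr[σ + μ].2.1 < v.2.1
          · have hb : pvLtA arr[σ + μ] v = true := by simp [pvLtA, h2, h3]
            rw [if_pos h2, if_pos h3, hb, if_pos rfl]
            exact hR hb
          · have hb : pvLtA arr[σ + μ] v = false := by simp [pvLtA, h2, h3]
            rw [if_pos h2, if_neg h3, hb]
            simp only [Bool.false_eq_true, if_false]
            exact hL hb
        · have hb : pvLtA arr[σ + μ] v = false := by simp [pvLtA, h1, h2]
          rw [if_neg h2, hb]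
          simp only [Bool.false_eq_true, if_false]
          exact hL hb

-- one loop iteration commutes with the representation map
theorem pv_step_phi (a b : List Int) (st : List (Int × Int × Int) × Int) (i : Nat) :
    (pvStepA a b st i).1.map pvPhi = pvStepB a b (st.1.map pvPhi) i := by
  unfold pvStepA pvStepB
  simp only [pv_head_phi]
  set h := PySem.List.pyGetD st.1 0 default with hh
  simp only [pvPhi]
  by_cases hj : h.2.2 = (b.length : Int) - 1
  · simp [hj]
  · simp only [hj, if_false]
    rw [← List.map_drop]
    set rest := st.1.drop 1 with hr
    set tmp : Int × Int × Int := (PySem.List.pyGetD a h.2.1 0 * PySem.List.pyGetD b (h.2.2 + 1) 0,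
      h.2.1, h.2.2 + 1) with ht
    have hv : ((PySem.List.pyGetD a h.2.1 0 * PySem.List.pyGetD b (h.2.2 + 1) 0, h.2.1), h.2.2 + 1)
        = pvPhi tmp := rfl
    rw [hv]
    by_cases hnil : rest = []
    · -- empty remainder: A appends immediately (end == -1), B's pvPos returns none
      rw [hnil]
      simp [pvBinarySearchInsert, pvBsiGo, pvPos, pvPosGo]
    · have hlen : 0 < rest.length := List.length_pos_of_ne_nil hnil
      have hcast : ((rest.length : Int) - 1) = ((rest.length - 1 : Nat) : Int) := by omega
      rw [pvBinarySearchInsert, hcast, show (0 : Int) = ((0 : Nat) : Int) from rfl,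
        pv_bsi_pos (rest.length + 1) rest tmp 0 (rest.length - 1) (by omega) (by omega) (by omega)]
      have hslice : ((rest.drop 0).take (rest.length - 1 - 0 + 1)) = rest := by
        simp; omega
      rw [hslice]
      rcases hp : pvPos (pvPhi tmp) (rest.map pvPhi) with _ | r
      · simp
      · simp [List.map_take, List.map_drop]

theorem pv_fold_phi (a b : List Int) (l : List Nat) (st : List (Int × Int × Int) × Int) :
    (l.foldl (pvStepA a b) st).1.map pvPhi = l.foldl (pvStepB a b) (st.1.map pvPhi) := by
  induction l generalizing st with
  | nil => rfl
  | cons x xs ih => rw [List.foldl_cons, List.foldl_cons, ih, pv_step_phi]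

-- ===== VERDICT (by name: the statement is the Claim_ definition above) =====
theorem sort_one_by_one2_spec : Claim_equal_sort_one_by_one2 := by
  intro a b n _ _
  unfold Spec_sort_one_by_one2 sort_one_by_one2 sort_one_by_one2_alt
  have h0 : ((PySem.List.enumerate a).map
      (fun p => (p.2 * PySem.List.pyGetD b 0 0, p.1, (0 : Int)))).map pvPhi =
      (PySem.List.enumerate a).map
      (fun p => ((p.2 * PySem.List.pyGetD b 0 0, p.1), (0 : Int))) := by
    simp only [List.map_map]; rfl
  simp only []
  rw [← h0]
  have h1 := pv_fold_phi a b (List.range (n - 1).toNat)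
    ((PySem.List.enumerate a).map (fun p => (p.2 * PySem.List.pyGetD b 0 0, p.1, (0 : Int))), n - 1)
  rw [← h1, pv_head_phi]
  rfl
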